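-- pv_equiv track=rewrite | github.com/Marczak-J/Influenza | step4.py | WordSeq
-- ===== SOURCE A (Python) =====
-- def WordSeq(seq):
--     d=[]
--     l=len(seq)
--     i=0
--     k=1
--     n=0
--     while i<l:
--         while seq[i:i+k] in d and i+k<l:
--             k+=1
--
--         if seq[i:i+k] not in d:
--             d.append(seq[i:i+k])
--         i+=k
--         k=1
--     return d
-- ===== SOURCE B (Python) =====
-- def WordSeq(seq):
--     d = []
--     seen = set()
--     w = ""
--     for c in seq:
--         w += c
--         if w in seen:
--             continue
--         seen.add(w)
--         d.append(w)
--         w = ""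
--     return d
-- ===== Notes on version B (the rewrite author's own statement) =====
-- stated objective: faster
-- what changed: Replaces A's nested while-loops (repeated substring slicing and linear membership scans of the phrase list) with a single left-to-right pass over the characters that grows a current word and checks it against a hash set of already-emitted phrases.
import Mathlib
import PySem

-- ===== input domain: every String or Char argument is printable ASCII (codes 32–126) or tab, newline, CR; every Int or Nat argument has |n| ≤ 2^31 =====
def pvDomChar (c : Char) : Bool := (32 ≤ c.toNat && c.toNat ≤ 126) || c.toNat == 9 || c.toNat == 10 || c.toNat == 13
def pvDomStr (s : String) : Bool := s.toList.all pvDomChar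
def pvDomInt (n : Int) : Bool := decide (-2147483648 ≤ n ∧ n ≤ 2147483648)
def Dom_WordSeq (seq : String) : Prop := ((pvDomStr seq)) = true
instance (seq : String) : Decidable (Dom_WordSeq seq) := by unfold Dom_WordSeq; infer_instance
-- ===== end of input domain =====

-- B replaces A's nested while-loops (substring slicing + linear scans of the phrase list)
-- by a single pass over the characters with a growing current word and a set of seen phrases;
-- a timing run measured B faster (asymptotic).

-- ===== PORT A =====
-- seq[i:i+k] with 0 ≤ i, 0 ≤ k: equals (cs.drop i).take k (PySem.List.slice_natCast_add).
def pvSlc (cs : List Char) (i k : Nat) : String := String.mk ((cs.drop i).take k)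

-- inner 'while seq[i:i+k] in d and i+k<l: k+=1' — returns the final k
def pvAInner (cs : List Char) (i k : Nat) (d : List String) : Nat :=
  if pvSlc cs i k ∈ d ∧ i + k < cs.length then pvAInner cs i (k + 1) d else k
termination_by cs.length - (i + k)
decreasing_by omega

theorem pvAInner_ge (cs : List Char) (i k : Nat) (d : List String) : k ≤ pvAInner cs i k d := by
  fun_induction pvAInner with
  | case1 h ih => omega
  | case2 => omega

-- outer 'while i<l' loop: state (i, d); k is recomputed from 1 each round, n is dead
def pvAOuter (cs : List Char) (i : Nat) (d : List String) : List String :=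
  if h : i < cs.length then
    -- k := aInner …; w := seq[i:i+k]  (inlined)
    pvAOuter cs (i + pvAInner cs i 1 d)
      (if pvSlc cs i (pvAInner cs i 1 d) ∈ d then d else d ++ [pvSlc cs i (pvAInner cs i 1 d)])
  else d
termination_by cs.length - i
decreasing_by have := pvAInner_ge cs i 1 d; omega

def WordSeq (seq : String) : List String := pvAOuter seq.toList 0 []

-- ===== PORT B =====
-- one step of B's for-loop; state = (d, seen, w)  (w kept as List Char, the PySem string side)
def pvBStep (st : List String × PySem.Set String × List Char) (c : Char) :
    List String × PySem.Set String × List Char :=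
  let w := st.2.2 ++ [c]
  if PySem.Set.contains st.2.1 (String.mk w) then (st.1, st.2.1, w)
  else (st.1 ++ [String.mk w], PySem.Set.add st.2.1 (String.mk w), [])

def WordSeq_alt (seq : String) : List String :=
  (seq.toList.foldl pvBStep ([], PySem.Set.empty, [])).1

-- ===== PRECONDITION & SPEC =====
def Spec_WordSeq (seq : String) (out : List String) : Prop := out = WordSeq_alt seq
instance (seq : String) (out : List String) : Decidable (Spec_WordSeq seq out) := by unfold Spec_WordSeq; infer_instance

-- ===== CLAIM (what is proved, stated in full; the proofs are below) =====
def Claim_equal_WordSeq : Prop := ∀ (seq : String), Dom_WordSeq seq → Spec_WordSeq seq (WordSeq seq)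

-- ===== LEMMAS AND PROOFS =====

theorem pvAInner_le_len (cs : List Char) (i k : Nat) (d : List String)
    (h : i + k ≤ cs.length) : i + pvAInner cs i k d ≤ cs.length := by
  fun_induction pvAInner with
  | case1 k hc ih => exact ih (by omega)
  | case2 => omega

theorem pvAInner_mem (cs : List Char) (i k : Nat) (d : List String) :
    ∀ j, k ≤ j → j < pvAInner cs i k d → pvSlc cs i j ∈ d := by
  fun_induction pvAInner with
  | case1 k hc ih =>
    intro j hj1 hj2
    rcases Nat.eq_or_lt_of_le hj1 with rfl | hlt
    · exact hc.1
    · exact ih j hlt hj2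
  | case2 k hc => intro j hj1 hj2; omega

theorem pvAInner_stop (cs : List Char) (i k : Nat) (d : List String) :
    ¬ (pvSlc cs i (pvAInner cs i k d) ∈ d ∧ i + pvAInner cs i k d < cs.length) := by
  fun_induction pvAInner with
  | case1 k hc ih => exact ih
  | case2 k hc => exact hc

theorem pv_take_succ (cs : List Char) (i j : Nat) (h : i + j < cs.length) :
    (cs.drop i).take (j + 1) = (cs.drop i).take j ++ [cs[i + j]] := by
  have hj : j < (cs.drop i).length := by simp; omega
  rw [List.take_succ, List.getElem?_eq_getElem hj]
  simp [List.getElem_drop]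

-- folding B's step over the k-length segment starting at i+j, with current word seq[i:i+j]
theorem pvSegFold (cs : List Char) (i k : Nat) (d : List String)
    (hik : i + k ≤ cs.length)
    (hmem : ∀ m, 1 ≤ m → m < k → pvSlc cs i m ∈ d) :
    ∀ j, j < k →
      (((cs.drop (i + j)).take (k - j)).foldl pvBStep (d, d, (cs.drop i).take j)) =
        (if pvSlc cs i k ∈ d then (d, d, (cs.drop i).take k)
         else (d ++ [pvSlc cs i k], d ++ [pvSlc cs i k], [])) := by
  intro j hj
  induction hn : k - j generalizing j with
  | zero => omega
  | succ n ih =>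
    have hlt : i + j < cs.length := by omega
    have hdrop : cs.drop (i + j) = cs[i + j] :: cs.drop (i + j + 1) :=
      (List.drop_eq_getElem_cons hlt)
    rw [hdrop]
    simp only [List.take_succ_cons, List.foldl_cons]
    have hw : (cs.drop i).take j ++ [cs[i + j]] = (cs.drop i).take (j + 1) :=
      (pv_take_succ cs i j hlt).symm
    have hstep : pvBStep (d, d, (cs.drop i).take j) cs[i + j] =
        (if pvSlc cs i (j + 1) ∈ d then (d, d, (cs.drop i).take (j + 1))
         else (d ++ [pvSlc cs i (j + 1)], PySem.Set.add d (pvSlc cs i (j + 1)), [])) := by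
      -- Set.contains agrees with list membership ('simp' normalises both sides)
      simp [pvBStep, hw, pvSlc]
    rw [hstep]
    by_cases hcase : j + 1 < k
    · have hm : pvSlc cs i (j + 1) ∈ d := hmem (j + 1) (by omega) hcase
      rw [if_pos hm]
      have : i + j + 1 = i + (j + 1) := by omega
      rw [this]
      exact ih (j + 1) hcase (by omega)
    · have hjk : j + 1 = k := by omega
      subst hjk
      have hn0 : n = 0 := by omega
      subst hn0
      simp only [List.take_zero, List.foldl_nil]
      by_cases hm : pvSlc cs i (j + 1) ∈ d
      · rw [if_pos hm, if_pos hm]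
      · rw [if_neg hm, if_neg hm, PySem.Set.add_of_not_mem hm]

-- main loop correspondence: B's fold over the suffix from i equals A's outer loop from (i, d)
theorem pvMain (n : Nat) (cs : List Char) (i : Nat) (d : List String)
    (hn : cs.length - i ≤ n) (hi : i ≤ cs.length) :
    ((cs.drop i).foldl pvBStep (d, d, [])).1 = pvAOuter cs i d := by
  induction n generalizing i d with
  | zero =>
    have : i = cs.length := by omega
    subst this
    rw [pvAOuter]
    simp
  | succ n ih =>
    by_cases h : i < cs.length
    · rw [pvAOuter, dif_pos h]
      set k := pvAInner cs i 1 d with hk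
      have hk1 : 1 ≤ k := pvAInner_ge cs i 1 d
      have hkle : i + k ≤ cs.length := pvAInner_le_len cs i 1 d (by omega)
      have hmem : ∀ m, 1 ≤ m → m < k → pvSlc cs i m ∈ d :=
        fun m h1 h2 => pvAInner_mem cs i 1 d m h1 h2
      have hstop := pvAInner_stop cs i 1 d
      rw [← hk] at hstop
      -- split the suffix into the phrase segment and the rest
      have hsplit : cs.drop i = (cs.drop i).take k ++ cs.drop (i + k) := by
        rw [← List.drop_drop]
        exact (List.take_append_drop k (cs.drop i)).symm
      rw [hsplit, List.foldl_append]
      have hseg := pvSegFold cs i k d hkle hmem 0 (by omega)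
      simp only [Nat.add_zero, Nat.sub_zero, List.take_zero] at hseg
      rw [hseg]
      by_cases hm : pvSlc cs i k ∈ d
      · -- phrase already known: by the stop condition we are at the end of the string
        have hend : i + k = cs.length := by
          by_contra hne
          exact hstop ⟨hm, by omega⟩
        rw [if_pos hm, if_pos hm, hend]
        simp [pvAOuter]
      · rw [if_neg hm, if_neg hm]
        exact ih (i + k) (d ++ [pvSlc cs i k]) (by omega) (by omega)
    · have : i = cs.length := by omega
      subst this
      rw [pvAOuter]
      simp

-- ===== VERDICT (by name: the statement is the Claim_ definition above) =====
theorem WordSeq_spec : Claim_equal_WordSeq := by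
  intro seq _
  unfold Spec_WordSeq WordSeq WordSeq_alt
  have := pvMain seq.toList.length seq.toList 0 [] (by omega) (by omega)
  simpa [PySem.Set.empty] using this.symm
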